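-- pv_equiv track=rewrite | github.com/LanceNorskog/deep_meter_2 | snlp.py | punct
-- ===== SOURCE A (Python) =====
-- def punct(words):
--     # hanging possessive problem with SNLI corpus
--     if words[0] == "'" or words[0] == "'s":
--         words = words[1:]
--     # cmudict stores possessives
--     out = []
--     i = 0
--     while i < len(words) -1:
--         if words[i + 1] == "'s":
--             out += [ words[i] + "'s" ]
--             i += 1
--         else:
--             out += [ words[i] ]
--         i += 1
--     words = out
--     return words
-- ===== SOURCE B (Python) =====
-- def punct(words):
--     # hanging possessive problem with SNLI corpus
--     if words[0] == "'" or words[0] == "'s":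
--         words = words[1:]
--     # single pass with a one-word pending buffer; the trailing pending word is
--     # dropped, like the original (its loop never emits the last element)
--     out = []
--     pending = None
--     for w in words:
--         if pending is None:
--             pending = w
--         elif w == "'s":
--             out.append(pending + "'s")
--             pending = None
--         else:
--             out.append(pending)
--             pending = w
--     return out
-- ===== Notes on version B (the rewrite author's own statement) =====
-- stated objective: alternative
-- what changed: Replaces the index-based while loop with one-step lookahead (words[i+1]) and a manual i += 1/2 cursor by a single element-wise pass that keeps a one-word pending buffer (Option state): an "'s" token closes the pending word as a possessive, any other token flushes it, and the trailing pending word is dropped; avoiding per-iteration index lookups and one-element temporary lists ('out += [x]') gives a constant-factor speedup.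
import Mathlib
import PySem

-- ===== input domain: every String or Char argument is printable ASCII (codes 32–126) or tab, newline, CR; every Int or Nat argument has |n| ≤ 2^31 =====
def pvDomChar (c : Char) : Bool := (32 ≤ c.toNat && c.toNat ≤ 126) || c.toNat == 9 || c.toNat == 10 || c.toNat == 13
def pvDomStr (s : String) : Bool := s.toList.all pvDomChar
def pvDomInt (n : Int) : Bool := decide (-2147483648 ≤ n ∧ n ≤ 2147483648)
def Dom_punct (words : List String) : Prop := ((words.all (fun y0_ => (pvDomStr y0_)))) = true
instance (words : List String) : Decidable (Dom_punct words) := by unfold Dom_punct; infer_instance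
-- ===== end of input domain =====

-- B replaces A's index/lookahead while-loop by one element-wise pass with a pending-word buffer;
-- return values agree on all non-empty inputs (A and B both raise IndexError on []).

-- ===== PORT A =====
-- the leading-token strip: words[0] is only read when words ≠ [] (Pre_); on [] Python raises IndexError
def stripLeadA (words : List String) : List String :=
  match words with
  | [] => []        -- unreachable under Pre_punct (Python raises IndexError here)
  | w :: rest => if w = "'" ∨ w = "'s" then rest else w :: rest

-- the while loop: i < len(words) - 1; indices i and i+1 are always in range there, so getD is exact
def punctLoopA (ws : List String) (out : List String) (i : Nat) : List String :=
  if i < ws.length - 1 then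
    if ws.getD (i + 1) "" = "'s" then
      punctLoopA ws (out ++ [ws.getD i "" ++ "'s"]) (i + 2)
    else
      punctLoopA ws (out ++ [ws.getD i ""]) (i + 1)
  else out
termination_by ws.length - i
decreasing_by all_goals omega

def punct (words : List String) : List String :=
  punctLoopA (stripLeadA words) [] 0

-- ===== PORT B =====
def stripLeadB (words : List String) : List String :=
  match words with
  | [] => []        -- unreachable under Pre_punct (Python raises IndexError here)
  | w :: rest => if w = "'" ∨ w = "'s" then rest else w :: rest

-- one fold step over the words: state = (emitted output, pending word or none)
def stepB (st : List String × Option String) (w : String) : List String × Option String :=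
  match st.2 with
  | none => (st.1, some w)
  | some p => if w = "'s" then (st.1 ++ [p ++ "'s"], none) else (st.1 ++ [p], some w)

def punct_alt (words : List String) : List String :=
  ((stripLeadB words).foldl stepB ([], none)).1

-- ===== PRECONDITION & SPEC =====
-- Pre_ excludes only the empty list, on which A raises IndexError at words[0] (B raises there too)
def Pre_punct (words : List String) : Prop := words ≠ []
instance (words : List String) : Decidable (Pre_punct words) := by unfold Pre_punct; infer_instance
def pvWitness_punct : List String := ["the", "dog", "'s", "tail", "end"]
def Spec_punct (words : List String) (out : List String) : Prop := out = punct_alt words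
instance (words : List String) (out : List String) : Decidable (Spec_punct words out) := by unfold Spec_punct; infer_instance

-- ===== CLAIM (what is proved, stated in full; the proofs are below) =====
def Claim_equal_punct : Prop := ∀ (words : List String), Dom_punct words → Pre_punct words → Spec_punct words (punct words)

-- ===== LEMMAS AND PROOFS =====

-- recursive specification both passes compute: `p` is B's pending word
def mergeSpec : Option String → List String → List String
  | _, [] => []
  | none, w :: ws => mergeSpec (some w) ws
  | some p, w :: ws =>
      if w = "'s" then (p ++ "'s") :: mergeSpec none ws else p :: mergeSpec (some w) ws

lemma stripLead_eq (words : List String) : stripLeadA words = stripLeadB words := rfl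

lemma foldl_stepB (ws : List String) (out : List String) (p : Option String) :
    (ws.foldl stepB (out, p)).1 = out ++ mergeSpec p ws := by
  induction ws generalizing out p with
  | nil => simp [mergeSpec.eq_def]
  | cons w ws ih =>
      cases p with
      | none => simp [stepB, mergeSpec, ih]
      | some q =>
          by_cases h : w = "'s" <;> simp [stepB, mergeSpec, h, ih]

lemma mergeSpec_none_short (l : List String) (h : l.length ≤ 1) :
    mergeSpec none l = [] := by
  match l, h with
  | [], _ => rfl
  | [x], _ => rfl

lemma punctLoopA_eq (ws : List String) (out : List String) (i : Nat) :
    punctLoopA ws out i = out ++ mergeSpec none (ws.drop i) := by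
  fun_induction punctLoopA ws out i with
  | case1 out i hlt hs ih =>
      rw [ih]
      have h1 : i < ws.length := by omega
      have h2 : i + 1 < ws.length := by omega
      have hd1 : ws.drop i = ws[i] :: ws.drop (i + 1) := List.drop_eq_getElem_cons h1
      have hd2 : ws.drop (i + 1) = ws[i+1] :: ws.drop (i + 2) := List.drop_eq_getElem_cons h2
      have he2 : ws.getD (i + 1) "" = ws[i+1] := by simp [List.getD, List.getElem?_eq_getElem h2]
      rw [he2] at hs
      rw [hd1, hd2]
      simp [mergeSpec, hs, List.getElem?_eq_getElem h1]
  | case2 out i hlt hs ih =>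
      rw [ih]
      have h1 : i < ws.length := by omega
      have h2 : i + 1 < ws.length := by omega
      have hd1 : ws.drop i = ws[i] :: ws.drop (i + 1) := List.drop_eq_getElem_cons h1
      have hd2 : ws.drop (i + 1) = ws[i+1] :: ws.drop (i + 2) := List.drop_eq_getElem_cons h2
      have he2 : ws.getD (i + 1) "" = ws[i+1] := by simp [List.getD, List.getElem?_eq_getElem h2]
      rw [he2] at hs
      rw [hd1, hd2]
      simp [mergeSpec, hs, List.getElem?_eq_getElem h1]
  | case3 out i h =>
      rw [mergeSpec_none_short]
      · simp
      · simp; omega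

-- ===== VERDICT (by name: the statement is the Claim_ definition above) =====
theorem punct_spec : Claim_equal_punct := by
  intro words _ _
  show punct words = punct_alt words
  rw [punct, punct_alt, ← stripLead_eq, punctLoopA_eq, foldl_stepB]
  simp
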